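-- pv_equiv track=rewrite | github.com/aniketp2302/Compproj | rabinkarp.py | fpattern
-- ===== SOURCE A (Python) =====
-- def fpattern(s,q):
-- 	l=len(s)
-- 	i=0
-- 	ind=-1
-- 	mul=-1
-- 	f=0
-- 	while i<l:
-- 		if s[i]=='?':#Here whenever a '?' is coming it is storing the index of it in the pattern and for f it is taking it's value as 0.
-- 			ind=i#This will take logm space which is lesser than logn so it works.
-- 			mul=pow(26,l-i-1,q)#This takes O(log q) space as it is a number less than q.
-- 			i=i+1
-- 		else:
-- 			f=(f + (((ord(s[i])-65)%q)*pow(26,l-i-1,q))%q)%q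
-- 			i=i+1
-- 	return [f,ind,mul]
-- ===== SOURCE B (Python) =====
-- def fpattern(s, q):
--     if not s:
--         return [0, -1, -1]
--     f = 0
--     p = 1 % q          # 26**0 reduced mod q, kept reduced throughout
--     ind = -1
--     mul = -1
--     i = len(s) - 1
--     for c in reversed(s):
--         if c == '?':
--             if ind == -1:
--                 ind = i
--                 mul = p
--         else:
--             f = (f + (ord(c) - 65) * p) % q
--         p = (p * 26) % q
--         i -= 1
--     return [f, ind, mul]
-- ===== Notes on version B (the rewrite author's own statement) =====
-- stated objective: faster
-- what changed: B replaces A's left-to-right loop with a per-character modular exponentiation pow(26,l-i-1,q) by a single right-to-left pass that maintains the current power of 26 mod q incrementally (Horner-style), recording ind/mul at the first '?' seen from the right (= A's last '?').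
import Mathlib
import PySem

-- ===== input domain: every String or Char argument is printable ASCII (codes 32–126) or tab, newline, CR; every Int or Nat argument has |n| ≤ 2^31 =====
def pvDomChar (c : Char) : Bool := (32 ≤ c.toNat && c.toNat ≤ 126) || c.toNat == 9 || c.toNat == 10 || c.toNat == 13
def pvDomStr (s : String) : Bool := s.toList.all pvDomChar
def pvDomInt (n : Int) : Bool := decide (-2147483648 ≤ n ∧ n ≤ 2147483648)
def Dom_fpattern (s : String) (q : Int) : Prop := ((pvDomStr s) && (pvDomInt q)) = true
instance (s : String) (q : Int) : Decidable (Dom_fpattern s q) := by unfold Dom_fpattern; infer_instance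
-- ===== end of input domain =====

-- B replaces A's per-character modular exponentiation by one right-to-left pass that keeps the
-- current power of 26 reduced mod q (objective: faster).

-- ===== PORT A =====
-- while-loop over s[i] ported as structural recursion on the remaining characters, i carried along;
-- pow(26, l-i-1, q) is PySem.Int.powMod (the exponent l-i-1 is ≥ 0 at every reachable call, so .toNat is exact)
def pvAuxA (q l : Int) : List Char → Int → Int → Int → Int → List Int
  | [], _i, ind, mul, f => [f, ind, mul]
  | c :: rest, i, ind, mul, f =>
    if c = '?' then
      pvAuxA q l rest (i + 1) i (PySem.Int.powMod 26 (l - i - 1).toNat q) f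
    else
      pvAuxA q l rest (i + 1) ind mul
        (PySem.Int.mod (f + PySem.Int.mod (PySem.Int.mod ((c.toNat : Int) - 65) q * PySem.Int.powMod 26 (l - i - 1).toNat q) q) q)

def fpattern (s : String) (q : Int) : List Int :=
  pvAuxA q (s.toList.length : Int) s.toList 0 (-1) (-1) 0

-- ===== PORT B =====
-- state is (f, p, ind, mul, i), exactly B's loop variables; the loop runs over reversed(s)
def pvStepB (q : Int) : (Int × Int × Int × Int × Int) → Char → (Int × Int × Int × Int × Int)
  | (f, p, ind, mul, i), c =>
    if c = '?' then
      if ind = -1 then (f, PySem.Int.mod (p * 26) q, i, p, i - 1)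
      else (f, PySem.Int.mod (p * 26) q, ind, mul, i - 1)
    else
      (PySem.Int.mod (f + ((c.toNat : Int) - 65) * p) q, PySem.Int.mod (p * 26) q, ind, mul, i - 1)

def fpattern_alt (s : String) (q : Int) : List Int :=
  if s.toList = [] then [0, -1, -1]
  else
    let res := List.foldl (pvStepB q) (0, PySem.Int.mod 1 q, -1, -1, (s.toList.length : Int) - 1) s.toList.reverse
    [res.1, res.2.2.1, res.2.2.2.1]

-- ===== PRECONDITION & SPEC =====
-- Python's A raises (ZeroDivisionError/ValueError in % / pow) exactly when q = 0 and s is non-empty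
def Pre_fpattern (s : String) (q : Int) : Prop := q ≠ 0 ∨ s.toList = []
instance (s : String) (q : Int) : Decidable (Pre_fpattern s q) := by unfold Pre_fpattern; infer_instance
def pvWitness_fpattern : String × Int := ("AB?D", 7)

def Spec_fpattern (s : String) (q : Int) (out : List Int) : Prop := out = fpattern_alt s q
instance (s : String) (q : Int) (out : List Int) : Decidable (Spec_fpattern s q out) := by unfold Spec_fpattern; infer_instance

-- ===== CLAIM (what is proved, stated in full; the proofs are below) =====
def Claim_equal_fpattern : Prop := ∀ (s : String) (q : Int), Dom_fpattern s q → Pre_fpattern s q → Spec_fpattern s q (fpattern s q)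

-- ===== LEMMAS AND PROOFS =====

-- reference values both loops are reduced to
def pvBase (c : Char) : Int := if c = '?' then 0 else (c.toNat : Int) - 65

def pvNumL : List Char → Int
  | [] => 0
  | c :: t => pvBase c * 26 ^ t.length + pvNumL t

def pvNumR : List Char → Int
  | [] => 0
  | c :: t => pvBase c + 26 * pvNumR t

def pvLastQ : List Char → Option Nat
  | [] => none
  | c :: t =>
    match pvLastQ t with
    | some j => some (j + 1)
    | none => if c = '?' then some 0 else none

def pvFirstQ : List Char → Option Nat
  | [] => none
  | c :: t => if c = '?' then some 0 else (pvFirstQ t).map (· + 1)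

lemma pvFmodModEq (q x : Int) : Int.fmod x q ≡ x [ZMOD q] := by
  unfold Int.ModEq
  rw [Int.fmod_eq_emod]
  split
  · simp [Int.emod_emod_of_dvd]
  · simp [Int.emod_emod_of_dvd]

lemma pvFmodCongr {q a b : Int} (h : a ≡ b [ZMOD q]) : Int.fmod a q = Int.fmod b q := by
  have hm : a % q = b % q := h
  have hd : (q ∣ a) ↔ (q ∣ b) := by
    rw [Int.dvd_iff_emod_eq_zero, Int.dvd_iff_emod_eq_zero, hm]
  rw [Int.fmod_eq_emod, Int.fmod_eq_emod, hm]
  by_cases h0 : 0 ≤ q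
  · simp [h0]
  · by_cases ha : q ∣ a
    · simp [ha, hd.mp ha]
    · simp [h0, ha, hd.not.mp ha]

lemma pvPowCongr (q : Int) {a b : Nat} (h : a = b) :
    Int.fmod ((26:Int) ^ a) q = Int.fmod ((26:Int) ^ b) q := by rw [h]

lemma pvNumL_of_noletter {cs : List Char} (h : cs.any (fun c => c != '?') = false) : pvNumL cs = 0 := by
  induction cs with
  | nil => rfl
  | cons c t ih =>
    simp only [List.any_cons, Bool.or_eq_false_iff, bne_eq_false_iff_eq] at h
    simp [pvNumL, pvBase, h.1, ih h.2]

lemma pvNumR_of_noletter {cs : List Char} (h : cs.any (fun c => c != '?') = false) : pvNumR cs = 0 := by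
  induction cs with
  | nil => rfl
  | cons c t ih =>
    simp only [List.any_cons, Bool.or_eq_false_iff, bne_eq_false_iff_eq] at h
    simp [pvNumR, pvBase, h.1, ih h.2]

lemma pvNumR_append (xs ys : List Char) :
    pvNumR (xs ++ ys) = pvNumR xs + 26 ^ xs.length * pvNumR ys := by
  induction xs with
  | nil => simp [pvNumR]
  | cons c t ih => simp [pvNumR, ih]; ring

lemma pvNumR_reverse (cs : List Char) : pvNumR cs.reverse = pvNumL cs := by
  induction cs with
  | nil => rfl
  | cons c t ih =>
    simp [List.reverse_cons, pvNumR_append, ih, pvNumR, pvNumL]; ring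

lemma pvFirstQ_append (xs ys : List Char) :
    pvFirstQ (xs ++ ys) =
      match pvFirstQ xs with
      | some k => some k
      | none => (pvFirstQ ys).map (· + xs.length) := by
  induction xs with
  | nil => simp [pvFirstQ]
  | cons c t ih =>
    by_cases hc : c = '?'
    · simp [pvFirstQ, hc]
    · simp only [List.cons_append, pvFirstQ, if_neg hc, ih]
      cases h : pvFirstQ t with
      | some k => simp
      | none => simp [Option.map_map]

lemma pvLastQ_lt {cs : List Char} {j : Nat} (h : pvLastQ cs = some j) : j < cs.length := by
  induction cs generalizing j with
  | nil => simp [pvLastQ] at h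
  | cons c t ih =>
    simp only [pvLastQ] at h
    cases ht : pvLastQ t with
    | some j' => rw [ht] at h; simp at h; have := ih ht; simp [← h]; omega
    | none =>
      rw [ht] at h
      by_cases hc : c = '?' <;> simp [hc] at h
      simp [← h]

lemma pvFirstQ_reverse (cs : List Char) :
    pvFirstQ cs.reverse = (pvLastQ cs).map (fun j => cs.length - 1 - j) := by
  induction cs with
  | nil => rfl
  | cons c t ih =>
    rw [List.reverse_cons, pvFirstQ_append, ih]
    cases ht : pvLastQ t with
    | some j =>
      have hj := pvLastQ_lt ht
      simp [pvLastQ, ht]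
      omega
    | none =>
      by_cases hc : c = '?' <;> simp [pvLastQ, ht, pvFirstQ, hc]

lemma pvAuxA_spec (q : Int) : ∀ (cs : List Char) (i ind mul f l : Int),
    l = i + (cs.length : Int) →
    pvAuxA q l cs i ind mul f =
      [ if cs.any (fun c => c != '?') then Int.fmod (f + pvNumL cs) q else f,
        (match pvLastQ cs with | some j => i + (j : Int) | none => ind),
        (match pvLastQ cs with | some j => Int.fmod ((26 : Int) ^ (cs.length - 1 - j)) q | none => mul) ] := by
  intro cs
  induction cs with
  | nil => intro i ind mul f l hl; simp [pvAuxA, pvLastQ]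
  | cons c t ih =>
    intro i ind mul f l hl
    have hlen : ((c :: t).length : Int) = (t.length : Int) + 1 := by simp
    have hl' : l = (i + 1) + (t.length : Int) := by rw [hl, hlen]; ring
    have hexp : (l - i - 1).toNat = t.length := by omega
    by_cases hc : c = '?'
    · rw [show pvAuxA q l (c :: t) i ind mul f
            = pvAuxA q l t (i + 1) i (PySem.Int.powMod 26 (l - i - 1).toNat q) f by
          simp [pvAuxA, hc]]
      rw [ih (i + 1) i (PySem.Int.powMod 26 (l - i - 1).toNat q) f l hl']
      have hany : (c :: t).any (fun c => c != '?') = t.any (fun c => c != '?') := by simp [hc]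
      have hnum : pvNumL (c :: t) = pvNumL t := by simp [pvNumL, pvBase, hc]
      rw [hany, hnum, hexp]
      cases ht : pvLastQ t with
      | some j =>
        have hj := pvLastQ_lt ht
        simp only [pvLastQ, ht, List.length_cons, List.cons.injEq]
        and_intros
        · trivial
        · push_cast; ring
        · exact pvPowCongr q (by omega)
        · trivial
      | none =>
        simp only [pvLastQ, ht, if_pos hc, List.length_cons, List.cons.injEq]
        and_intros <;> first | trivial | (push_cast; ring)
    · rw [show pvAuxA q l (c :: t) i ind mul f
            = pvAuxA q l t (i + 1) ind mul
                (PySem.Int.mod (f + PySem.Int.mod (PySem.Int.mod ((c.toNat : Int) - 65) q *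
                  PySem.Int.powMod 26 (l - i - 1).toNat q) q) q) by
          simp [pvAuxA, hc]]
      rw [ih (i + 1) ind mul _ l hl']
      have hany : (c :: t).any (fun c => c != '?') = true := by simp [hc]
      rw [hany]
      simp only [PySem.Int.powMod, PySem.Int.mod, hexp]
      have hinner : Int.fmod (Int.fmod ((c.toNat : Int) - 65) q * Int.fmod ((26:Int) ^ t.length) q) q
          ≡ ((c.toNat : Int) - 65) * (26:Int) ^ t.length [ZMOD q] :=
        (pvFmodModEq q _).trans ((pvFmodModEq q _).mul (pvFmodModEq q _))
      have hnum : pvNumL (c :: t) = ((c.toNat : Int) - 65) * (26:Int) ^ t.length + pvNumL t := by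
        simp [pvNumL, pvBase, hc]
      have hfcomp : (if t.any (fun c => c != '?') then
            Int.fmod (Int.fmod (f + Int.fmod (Int.fmod ((c.toNat : Int) - 65) q * Int.fmod ((26:Int) ^ t.length) q) q) q + pvNumL t) q
          else Int.fmod (f + Int.fmod (Int.fmod ((c.toNat : Int) - 65) q * Int.fmod ((26:Int) ^ t.length) q) q) q)
          = Int.fmod (f + pvNumL (c :: t)) q := by
        by_cases hany' : t.any (fun c => c != '?') = true
        · rw [if_pos hany', hnum]
          refine pvFmodCongr ?_
          calc Int.fmod (f + Int.fmod (Int.fmod ((c.toNat : Int) - 65) q * Int.fmod ((26:Int) ^ t.length) q) q) q + pvNumL t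
              ≡ (f + ((c.toNat : Int) - 65) * (26:Int) ^ t.length) + pvNumL t [ZMOD q] :=
                Int.ModEq.add_right _ ((pvFmodModEq q _).trans (Int.ModEq.add_left f hinner))
            _ = f + (((c.toNat : Int) - 65) * (26:Int) ^ t.length + pvNumL t) := by ring
        · rw [if_neg hany', hnum, pvNumL_of_noletter (by simpa using hany')]
          refine pvFmodCongr ?_
          calc f + Int.fmod (Int.fmod ((c.toNat : Int) - 65) q * Int.fmod ((26:Int) ^ t.length) q) q
              ≡ f + ((c.toNat : Int) - 65) * (26:Int) ^ t.length [ZMOD q] := Int.ModEq.add_left f hinner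
            _ = f + (((c.toNat : Int) - 65) * (26:Int) ^ t.length + 0) := by ring
      rw [hfcomp]
      cases ht : pvLastQ t with
      | some j =>
        have hj := pvLastQ_lt ht
        simp only [pvLastQ, ht, List.length_cons, List.cons.injEq]
        and_intros
        · trivial
        · push_cast; ring
        · exact pvPowCongr q (by omega)
        · trivial
      | none =>
        simp [pvLastQ, ht, hc]

lemma pvStepB_loop (q : Int) : ∀ (rs : List Char) (f p i0 ind mul : Int),
    (rs.length : Int) ≤ i0 + 1 →
    List.foldl (pvStepB q) (f, p, ind, mul, i0) rs =
      ( (if rs.any (fun c => c != '?') then Int.fmod (f + p * pvNumR rs) q else f),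
        (if rs = [] then p else Int.fmod (p * 26 ^ rs.length) q),
        (if ind = -1 then
           match pvFirstQ rs with
           | some k => i0 - (k : Int)
           | none => ind
         else ind),
        (if ind = -1 then
           match pvFirstQ rs with
           | some k => if k = 0 then p else Int.fmod (p * 26 ^ k) q
           | none => mul
         else mul),
        i0 - (rs.length : Int) ) := by
  intro rs
  induction rs with
  | nil => intro f p i0 ind mul hi; simp [pvFirstQ]
  | cons c t ih =>
    intro f p i0 ind mul hi
    have hi' : ((t.length : Int)) ≤ (i0 - 1) + 1 := by
      simp only [List.length_cons] at hi; push_cast at hi ⊢; omega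
    have hi0 : 0 ≤ i0 := by
      simp only [List.length_cons] at hi; push_cast at hi; omega
    have hpcomp : ∀ p0 : Int, (if t = [] then Int.fmod (p0 * 26) q
          else Int.fmod (Int.fmod (p0 * 26) q * 26 ^ t.length) q)
        = Int.fmod (p0 * 26 ^ (c :: t).length) q := by
      intro p0
      by_cases hT : t = []
      · simp [hT]
      · rw [if_neg hT]
        refine pvFmodCongr ?_
        calc Int.fmod (p0 * 26) q * (26:Int) ^ t.length
            ≡ (p0 * 26) * (26:Int) ^ t.length [ZMOD q] := Int.ModEq.mul_right _ (pvFmodModEq q _)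
          _ = p0 * (26:Int) ^ (c :: t).length := by
              simp only [List.length_cons, pow_succ]; ring
    have hfq : ∀ f0 : Int, (if t.any (fun c => c != '?') then
          Int.fmod (f0 + Int.fmod (p * 26) q * pvNumR t) q else f0)
        = (if (c :: t).any (fun c => c != '?') then Int.fmod (f0 + p * pvNumR (c :: t)) q else f0)
        ∨ True := fun _ => Or.inr trivial
    by_cases hc : c = '?'
    · have hany : (c :: t).any (fun c => c != '?') = t.any (fun c => c != '?') := by simp [hc]
      have hfcomp : (if t.any (fun c => c != '?') then
            Int.fmod (f + Int.fmod (p * 26) q * pvNumR t) q else f)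
          = (if (c :: t).any (fun c => c != '?') then Int.fmod (f + p * pvNumR (c :: t)) q else f) := by
        rw [hany]
        by_cases hany' : t.any (fun c => c != '?') = true
        · rw [if_pos hany', if_pos hany']
          refine pvFmodCongr (Int.ModEq.add_left f ?_)
          calc Int.fmod (p * 26) q * pvNumR t ≡ (p * 26) * pvNumR t [ZMOD q] :=
              Int.ModEq.mul_right _ (pvFmodModEq q _)
            _ = p * pvNumR (c :: t) := by simp [pvNumR, pvBase, hc]; ring
        · simp [hany']
      by_cases hind : ind = -1
      · rw [show List.foldl (pvStepB q) (f, p, ind, mul, i0) (c :: t)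
              = List.foldl (pvStepB q) (f, PySem.Int.mod (p * 26) q, i0, p, i0 - 1) t by
            simp [pvStepB, hc, hind]]
        rw [ih f (PySem.Int.mod (p * 26) q) (i0 - 1) i0 p hi']
        have hi0ne : ¬ (i0 = -1) := by omega
        simp only [PySem.Int.mod, if_neg hi0ne, if_pos hind, Prod.mk.injEq]
        and_intros
        · exact hfcomp
        · exact hpcomp p
        · simp [pvFirstQ, hc]
        · simp [pvFirstQ, hc]
        · simp only [List.length_cons]; push_cast; ring
      · rw [show List.foldl (pvStepB q) (f, p, ind, mul, i0) (c :: t)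
              = List.foldl (pvStepB q) (f, PySem.Int.mod (p * 26) q, ind, mul, i0 - 1) t by
            simp [pvStepB, hc, hind]]
        rw [ih f (PySem.Int.mod (p * 26) q) (i0 - 1) ind mul hi']
        simp only [PySem.Int.mod, if_neg hind, Prod.mk.injEq]
        and_intros
        · exact hfcomp
        · exact hpcomp p
        · trivial
        · trivial
        · simp only [List.length_cons]; push_cast; ring
    · rw [show List.foldl (pvStepB q) (f, p, ind, mul, i0) (c :: t)
            = List.foldl (pvStepB q)
                (PySem.Int.mod (f + ((c.toNat : Int) - 65) * p) q, PySem.Int.mod (p * 26) q, ind, mul, i0 - 1) t by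
          simp [pvStepB, hc]]
      rw [ih _ (PySem.Int.mod (p * 26) q) (i0 - 1) ind mul hi']
      simp only [PySem.Int.mod, Prod.mk.injEq]
      have hany : (c :: t).any (fun c => c != '?') = true := by simp [hc]
      have hrhs : pvNumR (c :: t) = ((c.toNat : Int) - 65) + 26 * pvNumR t := by
        simp [pvNumR, pvBase, hc]
      and_intros
      · rw [hany, if_pos rfl]
        by_cases hany' : t.any (fun c => c != '?') = true
        · rw [if_pos hany']
          refine pvFmodCongr ?_
          calc Int.fmod (f + ((c.toNat : Int) - 65) * p) q + Int.fmod (p * 26) q * pvNumR t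
              ≡ (f + ((c.toNat : Int) - 65) * p) + (p * 26) * pvNumR t [ZMOD q] :=
                Int.ModEq.add (pvFmodModEq q _) (Int.ModEq.mul_right _ (pvFmodModEq q _))
            _ = f + p * pvNumR (c :: t) := by rw [hrhs]; ring
        · rw [if_neg hany']
          rw [show f + p * pvNumR (c :: t) = f + ((c.toNat : Int) - 65) * p by
            rw [hrhs, pvNumR_of_noletter (by simpa using hany')]; ring]
      · exact hpcomp p
      · by_cases hind : ind = -1
        · simp only [if_pos hind, pvFirstQ, if_neg hc]
          cases htq : pvFirstQ t with
          | some k => simp; ring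
          | none => simp
        · simp [hind]
      · by_cases hind : ind = -1
        · simp only [if_pos hind, pvFirstQ, if_neg hc]
          cases htq : pvFirstQ t with
          | some k =>
            simp only [Option.map_some]
            by_cases hk : k = 0
            · subst hk; simp [pow_succ]
            · have hk1 : ¬ (k + 1 = 0) := by omega
              simp only [if_neg hk, if_neg hk1]
              refine pvFmodCongr ?_
              calc Int.fmod (p * 26) q * (26:Int) ^ k ≡ (p * 26) * (26:Int) ^ k [ZMOD q] :=
                  Int.ModEq.mul_right _ (pvFmodModEq q _)
                _ = p * (26:Int) ^ (k + 1) := by rw [pow_succ]; ring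
          | none => simp
        · simp [hind]
      · simp only [List.length_cons]; push_cast; ring

-- ===== VERDICT (by name: the statement is the Claim_ definition above) =====
theorem fpattern_spec : Claim_equal_fpattern := by
  intro s q _hdom _hpre
  unfold Spec_fpattern fpattern fpattern_alt
  by_cases h : s.toList = []
  · rw [h]
    simp [pvAuxA]
  · rw [if_neg h]
    rw [pvAuxA_spec q s.toList 0 (-1) (-1) 0 ((s.toList.length : Int)) (by ring)]
    have hilen : ((s.toList.reverse.length : Int)) ≤ ((s.toList.length : Int) - 1) + 1 := by simp
    rw [pvStepB_loop q s.toList.reverse 0 (PySem.Int.mod 1 q) ((s.toList.length : Int) - 1) (-1) (-1) hilen]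
    simp only [PySem.Int.mod, List.any_reverse, pvNumR_reverse, pvFirstQ_reverse]
    have hf : (if s.toList.any (fun c => c != '?') then Int.fmod (0 + Int.fmod 1 q * pvNumL s.toList) q else 0)
        = (if s.toList.any (fun c => c != '?') then Int.fmod (0 + pvNumL s.toList) q else 0) := by
      by_cases ha : s.toList.any (fun c => c != '?') = true
      · rw [if_pos ha, if_pos ha]
        refine pvFmodCongr (Int.ModEq.add_left 0 ?_)
        calc Int.fmod 1 q * pvNumL s.toList ≡ 1 * pvNumL s.toList [ZMOD q] :=
            Int.ModEq.mul_right _ (pvFmodModEq q 1)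
          _ = pvNumL s.toList := by ring
      · rw [if_neg ha, if_neg ha]
    cases hQ : pvLastQ s.toList with
    | none =>
      simp only [Option.map_none, List.cons.injEq]
      and_intros
      · exact hf.symm
      · simp
      · simp
      · trivial
    | some j =>
      have hj := pvLastQ_lt hQ
      simp only [Option.map_some, hf, List.cons.injEq]
      and_intros
      · trivial
      · rw [if_true]
        have hpos : 0 < s.toList.length := List.length_pos_of_ne_nil h
        rw [Nat.cast_sub (by omega : j ≤ s.toList.length - 1),
            Nat.cast_sub (by omega : 1 ≤ s.toList.length)]
        push_cast
        ring
      · rw [if_true]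
        by_cases hk : s.toList.length - 1 - j = 0
        · rw [if_pos hk, show s.toList.length - 1 - j = 0 from hk, pow_zero]
        · rw [if_neg hk]
          refine Eq.symm (pvFmodCongr ?_)
          calc Int.fmod 1 q * (26:Int) ^ (s.toList.length - 1 - j)
              ≡ 1 * (26:Int) ^ (s.toList.length - 1 - j) [ZMOD q] :=
                Int.ModEq.mul_right _ (pvFmodModEq q 1)
            _ = (26:Int) ^ (s.toList.length - 1 - j) := by ring
      · trivial
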